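-- pv_equiv track=rewrite | github.com/kiurtis/document-ai | performances.py | compute_overall_metrics
-- ===== SOURCE A (Python) =====
-- def compute_overall_metrics(ground_truth, predictions):
--     true_positives = 0
--     false_positives = 0
--     true_negatives = 0
--     false_negatives = 0
--
--     all_errors = set()
--     for errors in ground_truth.values():
--         all_errors.update(errors)
--     for errors in predictions.values():
--         all_errors.update(errors)
--
--     for doc_name, gt_errors in ground_truth.items():
--         pred_errors = predictions.get(doc_name, set())
--         for error in all_errors:
--             if error in gt_errors and error in pred_errors:
--                 true_positives += 1
--             elif error not in gt_errors and error not in pred_errors: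
--                 true_negatives += 1
--             elif error in pred_errors and error not in gt_errors:
--                 false_positives += 1
--             elif error not in pred_errors and error in gt_errors:
--                 false_negatives += 1
--
--     return true_positives, false_positives, true_negatives, false_negatives
-- ===== SOURCE B (Python) =====
-- def compute_overall_metrics(ground_truth, predictions):
--     all_errors = set()
--     for errors in ground_truth.values():
--         all_errors.update(errors)
--     for errors in predictions.values():
--         all_errors.update(errors)
--     n_all = len(all_errors)
--
--     tp = fp = tn = fn = 0
--     for doc_name, gt_errors in ground_truth.items():
--         g = set(gt_errors)
--         p = set(predictions.get(doc_name, ()))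
--         tp += len(g & p)
--         fp += len(p - g)
--         fn += len(g - p)
--         tn += n_all - len(g | p)
--     return tp, fp, tn, fn
-- ===== Notes on version B (the rewrite author's own statement) =====
-- stated objective: faster
-- what changed: Replaces A's inner scan over every global error label for every document by per-document set intersection/difference sizes, with true negatives obtained by subtracting the per-document union size from the global label count.
import Mathlib
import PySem

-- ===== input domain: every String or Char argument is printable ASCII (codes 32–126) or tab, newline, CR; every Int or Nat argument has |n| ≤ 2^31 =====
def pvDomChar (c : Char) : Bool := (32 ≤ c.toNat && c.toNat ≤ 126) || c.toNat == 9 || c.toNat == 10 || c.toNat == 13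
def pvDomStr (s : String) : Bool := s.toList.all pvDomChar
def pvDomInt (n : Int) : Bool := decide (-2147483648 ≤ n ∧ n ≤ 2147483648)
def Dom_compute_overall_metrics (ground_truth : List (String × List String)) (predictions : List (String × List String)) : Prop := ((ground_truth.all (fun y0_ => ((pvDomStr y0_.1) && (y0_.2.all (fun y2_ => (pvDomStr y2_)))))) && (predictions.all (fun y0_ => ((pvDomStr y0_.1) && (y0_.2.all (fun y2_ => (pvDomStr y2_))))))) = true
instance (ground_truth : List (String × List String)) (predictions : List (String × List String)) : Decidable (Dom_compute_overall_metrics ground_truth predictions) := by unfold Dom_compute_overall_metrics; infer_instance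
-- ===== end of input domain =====

-- B replaces A's inner scan over every global error label by per-document set
-- intersection/difference sizes (tn by subtraction from the global label count);
-- same return value, asymptotically fewer membership tests per document.

-- `predictions.get(doc_name, <default empty>)`: first-match lookup in the association list (used by both ports)
def pvGet (d : List (String × List String)) (k : String) : List String :=
  match d.find? (fun p => p.1 == k) with
  | some p => p.2
  | none => []

-- ===== PORT A =====
-- the body of A's inner `for error in all_errors` loop, same if/elif chain
def pvAStep (gt_errors pred_errors : List String) : (Int × Int × Int × Int) → String → (Int × Int × Int × Int)
  | (tp, fp, tn, fn), error =>
    if error ∈ gt_errors ∧ error ∈ pred_errors then (tp + 1, fp, tn, fn)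
    else if error ∉ gt_errors ∧ error ∉ pred_errors then (tp, fp, tn + 1, fn)
    else if error ∈ pred_errors ∧ error ∉ gt_errors then (tp, fp + 1, tn, fn)
    else if error ∉ pred_errors ∧ error ∈ gt_errors then (tp, fp, tn, fn + 1)
    else (tp, fp, tn, fn)

def compute_overall_metrics (ground_truth : List (String × List String)) (predictions : List (String × List String)) : Int × Int × Int × Int :=
  let all1 : PySem.Set String := ground_truth.foldl (fun s p => PySem.Set.update s p.2) PySem.Set.empty
  let all_errors : PySem.Set String := predictions.foldl (fun s p => PySem.Set.update s p.2) all1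
  ground_truth.foldl (fun acc doc =>
    all_errors.foldl (pvAStep doc.2 (pvGet predictions doc.1)) acc) (0, 0, 0, 0)

-- ===== PORT B =====
def compute_overall_metrics_alt (ground_truth : List (String × List String)) (predictions : List (String × List String)) : Int × Int × Int × Int :=
  let all1 : PySem.Set String := ground_truth.foldl (fun s p => PySem.Set.update s p.2) PySem.Set.empty
  let all_errors : PySem.Set String := predictions.foldl (fun s p => PySem.Set.update s p.2) all1
  let n_all : Int := PySem.Set.len all_errors
  ground_truth.foldl (fun c doc =>
    let g : PySem.Set String := PySem.Set.ofList doc.2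
    let p : PySem.Set String := PySem.Set.ofList (pvGet predictions doc.1)
    (c.1 + PySem.Set.len (PySem.Set.inter g p),
     c.2.1 + PySem.Set.len (PySem.Set.diff p g),
     c.2.2.1 + (n_all - PySem.Set.len (PySem.Set.union g p)),
     c.2.2.2 + PySem.Set.len (PySem.Set.diff g p))) (0, 0, 0, 0)

-- ===== PRECONDITION & SPEC =====
def Spec_compute_overall_metrics (ground_truth : List (String × List String)) (predictions : List (String × List String)) (out : Int × Int × Int × Int) : Prop := out = compute_overall_metrics_alt ground_truth predictions
instance (ground_truth : List (String × List String)) (predictions : List (String × List String)) (out : Int × Int × Int × Int) : Decidable (Spec_compute_overall_metrics ground_truth predictions out) := by unfold Spec_compute_overall_metrics; infer_instance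

-- ===== CLAIM (what is proved, stated in full; the proofs are below) =====
def Claim_equal_compute_overall_metrics : Prop := ∀ (ground_truth : List (String × List String)) (predictions : List (String × List String)), Dom_compute_overall_metrics ground_truth predictions → Spec_compute_overall_metrics ground_truth predictions (compute_overall_metrics ground_truth predictions)

-- ===== LEMMAS AND PROOFS =====

-- A's inner loop counts, over the whole error list, each of the four disjoint cases
lemma foldl_pvAStep (gt_errors pred_errors : List String) (E : List String) (c : Int × Int × Int × Int) :
    E.foldl (pvAStep gt_errors pred_errors) c =
      (c.1 + (E.countP (fun e => decide (e ∈ gt_errors ∧ e ∈ pred_errors)) : Int),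
       c.2.1 + (E.countP (fun e => decide (e ∈ pred_errors ∧ e ∉ gt_errors)) : Int),
       c.2.2.1 + (E.countP (fun e => decide (e ∉ gt_errors ∧ e ∉ pred_errors)) : Int),
       c.2.2.2 + (E.countP (fun e => decide (e ∉ pred_errors ∧ e ∈ gt_errors)) : Int)) := by
  induction E generalizing c with
  | nil => simp
  | cons e E ih =>
    obtain ⟨tp, fp, tn, fn⟩ := c
    by_cases hg : e ∈ gt_errors <;> by_cases hp : e ∈ pred_errors <;>
      simp [pvAStep, hg, hp, ih] <;> omega

-- two Nodup lists with the same membership: the second's length is a countP over the first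
lemma len_eq_countP {L M : List String} (hL : L.Nodup) (hM : M.Nodup) (p : String → Bool)
    (h : ∀ x, x ∈ M ↔ x ∈ L ∧ p x = true) : (M.length : Int) = (L.countP p : Int) := by
  have : M.Perm (L.filter p) := by
    rw [List.perm_ext_iff_of_nodup hM (hL.filter p)]
    intro a
    simp [List.mem_filter, h]
  rw [List.countP_eq_length_filter, this.length_eq]

-- membership in the accumulated `all_errors` set
lemma mem_foldl_update (l : List (String × List String)) (s : PySem.Set String) (y : String) :
    y ∈ l.foldl (fun s p => PySem.Set.update s p.2) s ↔ y ∈ s ∨ ∃ p ∈ l, y ∈ p.2 := by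
  induction l generalizing s with
  | nil => simp
  | cons q l ih => simp [ih, PySem.Set.mem_update]; tauto

lemma nodup_foldl_update (l : List (String × List String)) (s : PySem.Set String) (hs : s.Nodup) :
    (l.foldl (fun s p => PySem.Set.update s p.2) s).Nodup := by
  induction l generalizing s with
  | nil => exact hs
  | cons q l ih => exact ih _ (PySem.Set.nodup_update _ _ hs)

-- members of a looked-up prediction list are in `all_errors`
lemma pvGet_mem (predictions : List (String × List String)) (k x : String)
    (hx : x ∈ pvGet predictions k) : ∃ p ∈ predictions, x ∈ p.2 := by
  unfold pvGet at hx
  cases hfind : predictions.find? (fun p => p.1 == k) with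
  | none => simp [hfind] at hx
  | some q => exact ⟨q, List.mem_of_find?_eq_some hfind, by simpa [hfind] using hx⟩

-- per-document agreement: A's four counts over all_errors equal B's set sizes
lemma doc_counts_eq (E gt_errors pred_errors : List String) (hE : E.Nodup)
    (hg : ∀ x ∈ gt_errors, x ∈ E) (hp : ∀ x ∈ pred_errors, x ∈ E) :
    (E.countP (fun e => decide (e ∈ gt_errors ∧ e ∈ pred_errors)) : Int)
        = PySem.Set.len (PySem.Set.inter (PySem.Set.ofList gt_errors) (PySem.Set.ofList pred_errors)) ∧
    (E.countP (fun e => decide (e ∈ pred_errors ∧ e ∉ gt_errors)) : Int)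
        = PySem.Set.len (PySem.Set.diff (PySem.Set.ofList pred_errors) (PySem.Set.ofList gt_errors)) ∧
    (E.countP (fun e => decide (e ∉ gt_errors ∧ e ∉ pred_errors)) : Int)
        = (E.length : Int) - PySem.Set.len (PySem.Set.union (PySem.Set.ofList gt_errors) (PySem.Set.ofList pred_errors)) ∧
    (E.countP (fun e => decide (e ∉ pred_errors ∧ e ∈ gt_errors)) : Int)
        = PySem.Set.len (PySem.Set.diff (PySem.Set.ofList gt_errors) (PySem.Set.ofList pred_errors)) := by
  have hG := PySem.Set.nodup_ofList (xs := gt_errors)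
  have hP := PySem.Set.nodup_ofList (xs := pred_errors)
  refine ⟨?_, ?_, ?_, ?_⟩
  · rw [PySem.Set.len, ← len_eq_countP hE (PySem.Set.nodup_inter _ _ hG) _ ?_]
    intro x
    simp only [PySem.Set.mem_inter, PySem.Set.mem_ofList, decide_eq_true_eq]
    exact ⟨fun ⟨h1, h2⟩ => ⟨hg x h1, h1, h2⟩, fun ⟨_, h⟩ => h⟩
  · rw [PySem.Set.len, ← len_eq_countP hE (PySem.Set.nodup_diff _ _ hP) _ ?_]
    intro x
    simp only [PySem.Set.mem_diff, PySem.Set.mem_ofList, decide_eq_true_eq]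
    exact ⟨fun ⟨h1, h2⟩ => ⟨hp x h1, h1, h2⟩, fun ⟨_, h⟩ => h⟩
  · have hU : (PySem.Set.len (PySem.Set.union (PySem.Set.ofList gt_errors) (PySem.Set.ofList pred_errors)))
        = (E.countP (fun e => decide (e ∈ gt_errors ∨ e ∈ pred_errors)) : Int) := by
      rw [PySem.Set.len]
      apply len_eq_countP hE (PySem.Set.nodup_union _ _ hG)
      intro x
      simp only [PySem.Set.mem_union, PySem.Set.mem_ofList, decide_eq_true_eq]
      exact ⟨fun h => ⟨h.elim (hg x) (hp x), h⟩, fun ⟨_, h⟩ => h⟩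
    have hsplit := List.length_eq_countP_add_countP (fun e => decide (e ∈ gt_errors ∨ e ∈ pred_errors)) (l := E)
    have hcong : E.countP (fun e => decide ¬(decide (e ∈ gt_errors ∨ e ∈ pred_errors)) = true)
        = E.countP (fun e => decide (e ∉ gt_errors ∧ e ∉ pred_errors)) := by
      apply List.countP_congr
      intro e _
      by_cases h1 : e ∈ gt_errors <;> by_cases h2 : e ∈ pred_errors <;> simp [h1, h2]
    rw [hcong] at hsplit
    rw [hU]
    omega
  · rw [PySem.Set.len, ← len_eq_countP hE (PySem.Set.nodup_diff _ _ hG) _ ?_]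
    intro x
    simp only [PySem.Set.mem_diff, PySem.Set.mem_ofList, decide_eq_true_eq]
    exact ⟨fun ⟨h1, h2⟩ => ⟨hg x h1, h2, h1⟩, fun ⟨_, h2, h1⟩ => ⟨h1, h2⟩⟩

-- ===== VERDICT (by name: the statement is the Claim_ definition above) =====
theorem compute_overall_metrics_spec : Claim_equal_compute_overall_metrics := by
  intro ground_truth predictions _
  unfold Spec_compute_overall_metrics compute_overall_metrics compute_overall_metrics_alt
  simp only []
  set E : PySem.Set String :=
    predictions.foldl (fun s p => PySem.Set.update s p.2)
      (ground_truth.foldl (fun s p => PySem.Set.update s p.2) PySem.Set.empty) with hEdef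
  have hE : E.Nodup := by
    apply nodup_foldl_update
    apply nodup_foldl_update
    exact List.nodup_nil
  have hmem : ∀ x, ((∃ p ∈ ground_truth, x ∈ p.2) ∨ (∃ p ∈ predictions, x ∈ p.2)) → x ∈ E := by
    intro x hx
    rw [hEdef, mem_foldl_update]
    rcases hx with h | h
    · left; rw [mem_foldl_update]; right; exact h
    · right; exact h
  -- both outer folds over ground_truth agree from any common accumulator
  suffices h : ∀ (l : List (String × List String)), (∀ d ∈ l, d ∈ ground_truth) →
      ∀ (c : Int × Int × Int × Int),
      l.foldl (fun acc doc => E.foldl (pvAStep doc.2 (pvGet predictions doc.1)) acc) c =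
      l.foldl (fun c doc =>
        (c.1 + PySem.Set.len (PySem.Set.inter (PySem.Set.ofList doc.2) (PySem.Set.ofList (pvGet predictions doc.1))),
         c.2.1 + PySem.Set.len (PySem.Set.diff (PySem.Set.ofList (pvGet predictions doc.1)) (PySem.Set.ofList doc.2)),
         c.2.2.1 + (PySem.Set.len E - PySem.Set.len (PySem.Set.union (PySem.Set.ofList doc.2) (PySem.Set.ofList (pvGet predictions doc.1)))),
         c.2.2.2 + PySem.Set.len (PySem.Set.diff (PySem.Set.ofList doc.2) (PySem.Set.ofList (pvGet predictions doc.1))))) c by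
    exact (h ground_truth (fun d hd => hd) (0, 0, 0, 0)).symm ▸ rfl
  intro l hl
  induction l with
  | nil => intro c; rfl
  | cons d l ih =>
    intro c
    simp only [List.foldl_cons]
    have hg : ∀ x ∈ d.2, x ∈ E := fun x hx =>
      hmem x (Or.inl ⟨d, hl d (List.mem_cons_self), hx⟩)
    have hp : ∀ x ∈ pvGet predictions d.1, x ∈ E := fun x hx =>
      hmem x (Or.inr (pvGet_mem predictions d.1 x hx))
    obtain ⟨h1, h2, h3, h4⟩ := doc_counts_eq E d.2 (pvGet predictions d.1) hE hg hp
    rw [foldl_pvAStep, h1, h2, h3, h4]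
    have hlen : PySem.Set.len E = (E.length : Int) := rfl
    rw [ih (fun d' hd' => hl d' (List.mem_cons_of_mem _ hd')), hlen]
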